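-- pv_equiv track=rewrite | github.com/Marius322/Lightweight-Crypto | Digital_Map_Generator.py | generate_col2_columns
-- ===== SOURCE A (Python) =====
-- def generate_col2_columns(k):
--     '''
--
--     Inputs
--     ----------
--     k : Number of digits in binary number
--
--     Returns
--     -------
--     col2_dict : a dict containing all N2_i_j ops assigned to their columns
--
--     '''
--     col2_dict = {}
--     for r in range(2 * k - 2):
--         col2_entries = []
--
--         # Case 1: N2_i_j does not exist for Col(0) to Col(3)
--         if r < 4:
--             col2_dict[r] = col2_entries
--             continue
--
--         # Case 2: N2_i_j from Col(4) to Col(k)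
--         if r <= k:
--             base_i, base_j = k - r + 1, k
--
--         # Case 3: N2_i_j from Col(k + 1) to Col(2k-2)
--         else:
--             base_i, base_j = 1, 2 * k - r
--         n = 0
--
--         while True:
--             i = base_i + n
--             j = base_j - n
--             if j > i:
--                 col2_entries.append([2, i, j])
--                 n += 1
--             else:
--                 break
--
--         col2_dict[r] = col2_entries
--     return col2_dict
-- ===== SOURCE B (Python) =====
-- def generate_col2_columns(k):
--     # Scatter formulation: pre-create every column empty, then walk each pair
--     # i < j <= k once; the pair (i, j) belongs to column r = 2*k + 1 - i - j.
--     # The inner j-range is clipped so that only pairs landing in an existing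
--     # column 4..2*k-3 are visited; the ascending i loop reproduces each
--     # column's i-ascending entry order.
--     col2_dict = {r: [] for r in range(2 * k - 2)}
--     hi = 2 * k - 3
--     for i in range(1, k + 1):
--         base = 2 * k + 1 - i
--         for j in range(max(i + 1, base - hi), min(k, base - 4) + 1):
--             col2_dict[base - j].append([2, i, j])
--     return col2_dict
-- ===== Notes on version B (the rewrite author's own statement) =====
-- stated objective: alternative
-- what changed: Instead of A's per-column case split (base_i/base_j) and inward while-walk along each anti-diagonal, B pre-creates every column empty and scatters over the pairs i < j <= k once, sending [2,i,j] to column r = 2*k+1-i-j, with the inner j-range clipped to the pairs that land in an existing column.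
import Mathlib
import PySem

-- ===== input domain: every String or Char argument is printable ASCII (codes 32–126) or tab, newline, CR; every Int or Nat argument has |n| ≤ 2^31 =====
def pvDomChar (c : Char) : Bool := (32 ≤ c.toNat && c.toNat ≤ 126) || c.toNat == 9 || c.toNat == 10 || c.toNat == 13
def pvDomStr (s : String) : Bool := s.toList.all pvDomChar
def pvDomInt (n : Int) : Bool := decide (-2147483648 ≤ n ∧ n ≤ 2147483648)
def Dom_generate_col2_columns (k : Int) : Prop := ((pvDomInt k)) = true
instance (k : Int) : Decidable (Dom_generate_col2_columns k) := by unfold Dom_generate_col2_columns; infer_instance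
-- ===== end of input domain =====

-- B replaces A's per-column case split and inward while-walk by a scatter over all
-- pairs i < j ≤ k into pre-created empty columns (objective: alternative; same cost).

-- ===== PORT A =====
-- the 'while True' walk of A: i = base_i + n, j = base_j - n, append while j > i
def a_loop (base_i base_j : Int) (n : Int) (acc : List (List Int)) : List (List Int) :=
  let i := base_i + n
  let j := base_j - n
  if j > i then a_loop base_i base_j (n + 1) (acc ++ [[2, i, j]]) else acc
termination_by (base_j - base_i - 2 * n).toNat
decreasing_by simp_all; omega

def generate_col2_columns (k : Int) : List (Int × List (List Int)) :=
  ((PySem.List.pyRange 0 (2 * k - 2) 1).foldl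
    (fun d r =>
      if r < 4 then d.insert r []
      else
        let bij := if r ≤ k then (k - r + 1, k) else (1, 2 * k - r)
        d.insert r (a_loop bij.1 bij.2 0 []))
    (PySem.Dict.empty : PySem.Dict Int (List (List Int)))).items

-- ===== PORT B =====
-- B: col2_dict = {r: [] for r in range(2*k-2)}; hi = 2*k-3; then for i in 1..k,
-- for j in range(max(i+1, base-hi), min(k, base-4)+1) with base = 2*k+1-i,
-- append [2,i,j] to col2_dict[base-j]
-- (col2_dict[...].append(...) on an always-present key, ported as Dict.modify).
def generate_col2_columns_alt (k : Int) : List (Int × List (List Int)) :=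
  let d0 : PySem.Dict Int (List (List Int)) :=
    (PySem.List.pyRange 0 (2 * k - 2) 1).foldl (fun d r => d.insert r []) PySem.Dict.empty
  let hi := 2 * k - 3
  let d :=
    (PySem.List.pyRange 1 (k + 1) 1).foldl (fun d i =>
      let base := 2 * k + 1 - i
      (PySem.List.pyRange (max (i + 1) (base - hi)) (min k (base - 4) + 1) 1).foldl
        (fun d j => d.modify (base - j) [] (· ++ [[2, i, j]])) d) d0
  d.items

-- ===== PRECONDITION & SPEC =====
def Spec_generate_col2_columns (k : Int) (out : List (Int × List (List Int))) : Prop := out = generate_col2_columns_alt k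
instance (k : Int) (out : List (Int × List (List Int))) : Decidable (Spec_generate_col2_columns k out) := by unfold Spec_generate_col2_columns; infer_instance

-- ===== CLAIM (what is proved, stated in full; the proofs are below) =====
def Claim_equal_generate_col2_columns : Prop := ∀ (k : Int), Dom_generate_col2_columns k → Spec_generate_col2_columns k (generate_col2_columns k)

-- ===== LEMMAS AND PROOFS =====

-- A's per-column entries, as a function of r
def a_entries (k r : Int) : List (List Int) :=
  if r < 4 then []
  else
    let bij := if r ≤ k then (k - r + 1, k) else (1, 2 * k - r)
    a_loop bij.1 bij.2 0 []

-- the walk equals a mapped range on the anti-diagonal i + j = base_i + base_j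
theorem a_loop_eq (base_i base_j : Int) (n : Int) (acc : List (List Int)) :
    a_loop base_i base_j n acc =
      acc ++ (PySem.List.pyRange (base_i + n) (PySem.Int.floordiv (base_i + base_j + 1) 2) 1).map
        (fun i => [2, i, base_i + base_j - i]) := by
  rw [a_loop]
  by_cases h : base_j - n > base_i + n
  · rw [if_pos h, a_loop_eq base_i base_j (n + 1)]
    have hlt : base_i + n < PySem.Int.floordiv (base_i + base_j + 1) 2 := by
      have := (PySem.Int.le_floordiv_iff_mul_le (a := base_i + base_j + 1)
        (b := 2) (q := base_i + n + 1) (by omega)).mpr (by omega)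
      omega
    rw [PySem.List.pyRange_one_cons hlt]
    simp only [List.map_cons, List.append_assoc, List.singleton_append]
    have : base_i + base_j - (base_i + n) = base_j - n := by ring
    rw [this]
    ring_nf
  · rw [if_neg h]
    have hle : PySem.Int.floordiv (base_i + base_j + 1) 2 ≤ base_i + n := by
      have := (PySem.Int.floordiv_lt_iff_lt_mul (a := base_i + base_j + 1)
        (b := 2) (q := base_i + n + 1) (by omega)).mpr (by omega)
      omega
    rw [PySem.List.pyRange_one_eq_nil hle]
    simp
termination_by (base_j - base_i - 2 * n).toNat
decreasing_by simp_all; omega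

-- closed form of A's per-column entries
theorem a_entries_closed (k r : Int) (h4 : ¬ r < 4) :
    a_entries k r =
      (PySem.List.pyRange (max 1 (k + 1 - r)) (PySem.Int.floordiv (2 * k + 2 - r) 2) 1).map
        (fun i => [2, i, 2 * k + 1 - r - i]) := by
  unfold a_entries
  simp only [if_neg h4]
  by_cases hk : r ≤ k
  · simp only [if_pos hk]
    simp only [a_loop_eq, List.nil_append, add_zero]
    have h1 : k - r + 1 = max 1 (k + 1 - r) := by
      rw [max_eq_right (by omega)]; ring
    have h2 : k - r + 1 + k + 1 = 2 * k + 2 - r := by ring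
    have h3 : k - r + 1 + k = 2 * k + 1 - r := by ring
    rw [h2, h3, h1]
  · simp only [if_neg hk]
    simp only [a_loop_eq, List.nil_append, add_zero]
    have h2 : 1 + (2 * k - r) + 1 = 2 * k + 2 - r := by ring
    have h3 : 1 + (2 * k - r) = 2 * k + 1 - r := by ring
    rw [h2, h3]
    exact congrArg (fun a => (PySem.List.pyRange a _ 1).map _)
      (by rw [max_eq_left (by omega)])

-- a fold inserting fresh distinct keys, with a per-key value function, yields the mapped range
theorem foldl_insert_items (g : Int → List (List Int)) (m : Int) :
    ((PySem.List.pyRange 0 m 1).foldl (fun d r => d.insert r (g r))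
      (PySem.Dict.empty : PySem.Dict Int (List (List Int)))).items =
      (PySem.List.pyRange 0 m 1).map (fun r => (r, g r)) := by
  have := PySem.Dict.items_foldl_insert_fresh (l := PySem.List.pyRange 0 m 1)
    (k := fun r => r) (v := g) (d := (PySem.Dict.empty : PySem.Dict Int (List (List Int))))
    (by intro a _; simp [PySem.Dict.contains_empty])
    (by simpa using PySem.List.nodup_pyRange_one 0 m)
  simpa using this

theorem generate_col2_columns_eq_map (k : Int) :
    generate_col2_columns k = (PySem.List.pyRange 0 (2 * k - 2) 1).map (fun r => (r, a_entries k r)) := by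
  unfold generate_col2_columns
  rw [show (fun (d : PySem.Dict Int (List (List Int))) (r : Int) =>
      if r < 4 then d.insert r []
      else
        let bij := if r ≤ k then (k - r + 1, k) else (1, 2 * k - r)
        d.insert r (a_loop bij.1 bij.2 0 [])) =
      (fun d r => d.insert r (a_entries k r)) from by
    funext d r
    by_cases h : r < 4 <;> simp [a_entries, h]]
  exact foldl_insert_items (a_entries k) (2 * k - 2)

-- ---------- B side ----------

-- nested fold over (i, j) pairs = fold over the flattened pair list
theorem foldl_flatMap_map {α β δ : Type} (l : List α) (g : α → List β)
    (H : δ → α → β → δ) (d : δ) :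
    l.foldl (fun d i => (g i).foldl (fun d j => H d i j) d) d
      = (l.flatMap (fun i => (g i).map (fun j => (i, j)))).foldl (fun d p => H d p.1 p.2) d := by
  induction l generalizing d with
  | nil => simp
  | cons a t ih => simp [List.foldl_append, List.foldl_map, ih]

-- the scatter stream of B, flattened: (column, entry) pairs in loop order
def ops (k : Int) : List (Int × List Int) :=
  (((PySem.List.pyRange 1 (k + 1) 1).flatMap
      (fun i => (PySem.List.pyRange (max (i + 1) (2 * k + 1 - i - (2 * k - 3)))
        (min k (2 * k + 1 - i - 4) + 1) 1).map (fun j => (i, j)))).map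
      (fun p => (2 * k + 1 - p.1 - p.2, [2, p.1, p.2])))

theorem alt_eq_fold_ops (k : Int) :
    generate_col2_columns_alt k =
      ((ops k).foldl (fun d p => d.modify p.1 [] (· ++ [p.2]))
        ((PySem.List.pyRange 0 (2 * k - 2) 1).foldl (fun d r => d.insert r [])
          (PySem.Dict.empty : PySem.Dict Int (List (List Int))))).items := by
  unfold generate_col2_columns_alt ops
  dsimp only
  have h1 := foldl_flatMap_map (l := PySem.List.pyRange 1 (k + 1) 1)
    (g := fun i => PySem.List.pyRange (max (i + 1) (2 * k + 1 - i - (2 * k - 3)))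
        (min k (2 * k + 1 - i - 4) + 1) 1)
    (H := fun d (i j : Int) => d.modify (2 * k + 1 - i - j) [] (· ++ [[2, i, j]]))
    (d := (PySem.List.pyRange 0 (2 * k - 2) 1).foldl (fun d r => d.insert r [])
          (PySem.Dict.empty : PySem.Dict Int (List (List Int))))
  rw [h1]
  rw [List.foldl_map]

-- Set.update is the identity when every added element is already present
theorem set_update_of_subset (s : List Int) (xs : List Int) (h : ∀ x ∈ xs, x ∈ s) :
    PySem.Set.update s xs = s := by
  induction xs generalizing s with
  | nil => rfl
  | cons a t ih =>
    have hc : PySem.Set.contains s a = true := by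
      simpa [PySem.Set.contains] using h a (by simp)
    have ha : PySem.Set.add s a = s := by
      unfold PySem.Set.add; rw [if_pos hc]
    show PySem.Set.update (PySem.Set.add s a) t = s
    rw [ha]
    exact ih s (fun x hx => h x (by simp [hx]))

-- every scattered pair lands on an existing column
theorem ops_key_mem (k : Int) : ∀ p ∈ ops k, p.1 ∈ PySem.List.pyRange 0 (2 * k - 2) 1 := by
  intro p hp
  unfold ops at hp
  simp only [List.mem_map, List.mem_flatMap] at hp
  obtain ⟨q, ⟨i, -, ⟨j, hj, rfl⟩⟩, rfl⟩ := hp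
  have := PySem.List.mem_pyRange_one.mp hj
  exact PySem.List.mem_pyRange_one.mpr (by omega)

-- filter of an integer range by an interval predicate is the sub-range
theorem filter_pyRange (a b lo hi : Int) :
    (PySem.List.pyRange a b 1).filter (fun x => decide (lo ≤ x ∧ x < hi)) =
      PySem.List.pyRange (max a lo) (min b hi) 1 := by
  by_cases hab : a < b
  · rw [PySem.List.pyRange_one_cons hab, List.filter_cons]
    by_cases hmem : lo ≤ a ∧ a < hi
    · rw [if_pos (by simpa using hmem), filter_pyRange (a + 1) b lo hi]
      rw [max_eq_left (by omega : lo ≤ a + 1), max_eq_left (by omega : lo ≤ a)]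
      exact (PySem.List.pyRange_one_cons (by omega : a < min b hi)).symm
    · rw [if_neg (by simpa using hmem), filter_pyRange (a + 1) b lo hi]
      by_cases hlo : a < lo
      · rw [max_eq_right (by omega : a + 1 ≤ lo), max_eq_right (by omega : a ≤ lo)]
      · have hhi : hi ≤ a := by omega
        rw [PySem.List.pyRange_one_eq_nil (by omega : min b hi ≤ max (a + 1) lo),
          PySem.List.pyRange_one_eq_nil (by omega : min b hi ≤ max a lo)]
  · rw [PySem.List.pyRange_one_eq_nil (by omega : b ≤ a),
      PySem.List.pyRange_one_eq_nil (by omega : min b hi ≤ max a lo)]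
    rfl
termination_by (b - a).toNat
decreasing_by all_goals omega

-- picking the single element c (when present) out of an integer range
theorem filter_beq_and_pyRange (a b c : Int) (t : Bool) :
    (PySem.List.pyRange a b 1).filter (fun j => (j == c) && t) =
      if a ≤ c ∧ c < b ∧ t = true then [c] else [] := by
  cases t
  · simp
  · simp only [Bool.and_true]
    rw [List.filter_beq]
    by_cases hc : a ≤ c ∧ c < b
    · rw [List.count_eq_one_of_mem (PySem.List.nodup_pyRange_one a b)
        (PySem.List.mem_pyRange_one.mpr hc)]
      simp [hc]
    · rw [List.count_eq_zero_of_not_mem (fun hm => hc (PySem.List.mem_pyRange_one.mp hm))]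
      simp only [List.replicate_zero]
      rw [if_neg (by tauto)]

-- a guarded-singleton flatMap is a filtered map
theorem flatMap_ite_singleton {α β : Type} (l : List α) (P : α → Prop) [DecidablePred P]
    (e : α → β) :
    l.flatMap (fun i => if P i then [e i] else []) = (l.filter (fun i => decide (P i))).map e := by
  induction l with
  | nil => rfl
  | cons a t ih => by_cases h : P a <;> simp [h, ih]

-- one i-row of the scatter stream, restricted to column r
theorem inner_col (k r i : Int) :
    (List.map (fun j => [2, i, j])
      (List.filter (fun j => 2 * k + 1 - i - j == r)
        (PySem.List.pyRange (max (i + 1) (2 * k + 1 - i - (2 * k - 3)))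
          (min k (2 * k + 1 - i - 4) + 1) 1)))
    = if 4 ≤ r ∧ r ≤ 2 * k - 3 ∧ k + 1 - r ≤ i ∧ i < PySem.Int.floordiv (2 * k + 2 - r) 2
      then [[2, i, 2 * k + 1 - r - i]] else [] := by
  have hmod := PySem.Int.floordiv_mul_add_mod (2 * k + 2 - r) 2
  have hm0 := PySem.Int.mod_nonneg (2 * k + 2 - r) (b := 2) (by omega)
  have hm1 := PySem.Int.mod_lt (2 * k + 2 - r) (b := 2) (by omega)
  have hp : ∀ j ∈ PySem.List.pyRange (max (i + 1) (2 * k + 1 - i - (2 * k - 3)))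
      (min k (2 * k + 1 - i - 4) + 1) 1,
      (2 * k + 1 - i - j == r) = ((j == 2 * k + 1 - r - i) && true) := by
    intro j _
    by_cases hj : j = 2 * k + 1 - r - i
    · have h1 : 2 * k + 1 - i - j = r := by omega
      rw [h1, hj]
      simp
    · have h1 : (2 * k + 1 - i - j == r) = false := by
        simp only [beq_eq_false_iff_ne, ne_eq]; omega
      have h2 : (j == 2 * k + 1 - r - i) = false := by
        simp only [beq_eq_false_iff_ne, ne_eq]; omega
      simp [h1, h2]
  rw [List.filter_congr hp, filter_beq_and_pyRange]
  by_cases hc : max (i + 1) (2 * k + 1 - i - (2 * k - 3)) ≤ 2 * k + 1 - r - i ∧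
      2 * k + 1 - r - i < min k (2 * k + 1 - i - 4) + 1 ∧ (true : Bool) = true
  · obtain ⟨h1, h2, -⟩ := hc
    rw [if_pos ⟨h1, h2, rfl⟩, if_pos (by omega)]
    rfl
  · rw [if_neg hc, if_neg (fun h => hc ⟨by omega, by omega, rfl⟩)]
    rfl

-- per-column content of the scatter stream
theorem ops_filter_col (k r : Int) (hr : r ∈ PySem.List.pyRange 0 (2 * k - 2) 1) :
    ((ops k).filter (fun p => p.1 == r)).map (·.2) = a_entries k r := by
  obtain ⟨hr0, hr2⟩ := PySem.List.mem_pyRange_one.mp hr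
  unfold ops
  simp only [List.filter_map, List.map_map, List.filter_flatMap,
    List.map_flatMap, Function.comp_def]
  have hbody : (fun i : Int =>
      (List.map (fun j => [2, i, j])
        (List.filter (fun j => 2 * k + 1 - i - j == r)
          (PySem.List.pyRange (max (i + 1) (2 * k + 1 - i - (2 * k - 3)))
            (min k (2 * k + 1 - i - 4) + 1) 1))))
      = fun i : Int =>
        if 4 ≤ r ∧ r ≤ 2 * k - 3 ∧ k + 1 - r ≤ i ∧ i < PySem.Int.floordiv (2 * k + 2 - r) 2
        then [[2, i, 2 * k + 1 - r - i]] else [] := funext (inner_col k r)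
  rw [hbody]
  by_cases hP : 4 ≤ r
  · have hP2 : r ≤ 2 * k - 3 := by omega
    have hcond : (fun i : Int =>
        if 4 ≤ r ∧ r ≤ 2 * k - 3 ∧ k + 1 - r ≤ i ∧ i < PySem.Int.floordiv (2 * k + 2 - r) 2
        then [[2, i, 2 * k + 1 - r - i]] else ([] : List (List Int)))
        = fun i : Int =>
          if k + 1 - r ≤ i ∧ i < PySem.Int.floordiv (2 * k + 2 - r) 2
          then [[2, i, 2 * k + 1 - r - i]] else [] := by
      funext i
      simp [hP, hP2]
    rw [hcond, flatMap_ite_singleton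
      (P := fun i : Int => k + 1 - r ≤ i ∧ i < PySem.Int.floordiv (2 * k + 2 - r) 2)
      (e := fun i : Int => [2, i, 2 * k + 1 - r - i]),
      filter_pyRange, a_entries_closed k r (by omega)]
    have hmod := PySem.Int.floordiv_mul_add_mod (2 * k + 2 - r) 2
    have hm0 := PySem.Int.mod_nonneg (2 * k + 2 - r) (b := 2) (by omega)
    have hm1 := PySem.Int.mod_lt (2 * k + 2 - r) (b := 2) (by omega)
    rw [min_eq_right (by omega : PySem.Int.floordiv (2 * k + 2 - r) 2 ≤ k + 1)]
  · have hbody2 : (fun i : Int =>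
        if 4 ≤ r ∧ r ≤ 2 * k - 3 ∧ k + 1 - r ≤ i ∧ i < PySem.Int.floordiv (2 * k + 2 - r) 2
        then [[2, i, 2 * k + 1 - r - i]] else ([] : List (List Int)))
        = fun _ : Int => ([] : List (List Int)) := by
      funext i
      rw [if_neg (fun h => hP h.1)]
    rw [hbody2]
    unfold a_entries
    rw [if_pos (by omega : r < 4)]
    simp

theorem generate_col2_columns_alt_eq_map (k : Int) :
    generate_col2_columns_alt k = (PySem.List.pyRange 0 (2 * k - 2) 1).map (fun r => (r, a_entries k r)) := by
  rw [alt_eq_fold_ops]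
  have hd0items : ((PySem.List.pyRange 0 (2 * k - 2) 1).foldl (fun d r => d.insert r [])
      (PySem.Dict.empty : PySem.Dict Int (List (List Int)))).items =
      (PySem.List.pyRange 0 (2 * k - 2) 1).map (fun r => (r, ([] : List (List Int)))) :=
    foldl_insert_items (fun _ => []) (2 * k - 2)
  have hd0keys : ((PySem.List.pyRange 0 (2 * k - 2) 1).foldl (fun d r => d.insert r [])
      (PySem.Dict.empty : PySem.Dict Int (List (List Int)))).keys =
      PySem.List.pyRange 0 (2 * k - 2) 1 := by
    simp [PySem.Dict.keys, hd0items, Function.comp_def]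
  have hkeys : ((ops k).foldl (fun d p => d.modify p.1 [] (· ++ [p.2]))
      ((PySem.List.pyRange 0 (2 * k - 2) 1).foldl (fun d r => d.insert r [])
        (PySem.Dict.empty : PySem.Dict Int (List (List Int))))).keys =
      PySem.List.pyRange 0 (2 * k - 2) 1 := by
    rw [PySem.Dict.keys_foldl_modify_key (ops k) (fun p => p.1) [] (fun _ p => (· ++ [p.2]))]
    rw [hd0keys]
    exact set_update_of_subset _ _ (by
      intro x hx
      obtain ⟨p, hp, rfl⟩ := List.mem_map.mp hx
      exact ops_key_mem k p hp)
  rw [PySem.Dict.items_eq_map_keys _ (by rw [hkeys]; exact PySem.List.nodup_pyRange_one 0 (2 * k - 2)) [], hkeys]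
  refine List.map_congr_left (fun r hr => ?_)
  rw [PySem.Dict.getD_foldl_modify_append]
  have hval : ((PySem.List.pyRange 0 (2 * k - 2) 1).foldl (fun d r => d.insert r [])
      (PySem.Dict.empty : PySem.Dict Int (List (List Int)))).getD r [] = [] := by
    refine PySem.Dict.getD_of_mem_items _ ?_ (by rw [hd0keys]; exact PySem.List.nodup_pyRange_one 0 (2 * k - 2)) []
    rw [hd0items]
    exact List.mem_map.mpr ⟨r, hr, rfl⟩
  rw [hval, List.nil_append, ops_filter_col k r hr]

-- ===== VERDICT (by name: the statement is the Claim_ definition above) =====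
theorem generate_col2_columns_spec : Claim_equal_generate_col2_columns := by
  intro k _
  unfold Spec_generate_col2_columns
  rw [generate_col2_columns_eq_map, generate_col2_columns_alt_eq_map]
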